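-- pv_equiv track=rewrite | github.com/benjdevries/advent-of-code-2025 | day_06/part_2.py | operand_groups
-- ===== SOURCE A (Python) =====
-- def operand_groups(columns):
--     group = []
--     for column in columns:
--         val = "".join(column).strip()
--         if val:
--             group.append(int(val))
--         else:
--             yield group
--             group = []
--     yield group
-- ===== SOURCE B (Python) =====
-- def operand_groups(columns):
--     vals = ["".join(c).strip() for c in columns]
--     start = 0
--     for i, v in enumerate(vals):
--         if not v:
--             yield [int(x) for x in vals[start:i]]
--             start = i + 1
--     yield [int(x) for x in vals[start:]]
-- ===== Notes on version B (the rewrite author's own statement) =====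
-- stated objective: alternative
-- what changed: B materializes all stripped column strings in one pass, then walks them tracking the index after the last separator and yields integer-converted slices, instead of accumulating one int at a time into a growing group.
import Mathlib
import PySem

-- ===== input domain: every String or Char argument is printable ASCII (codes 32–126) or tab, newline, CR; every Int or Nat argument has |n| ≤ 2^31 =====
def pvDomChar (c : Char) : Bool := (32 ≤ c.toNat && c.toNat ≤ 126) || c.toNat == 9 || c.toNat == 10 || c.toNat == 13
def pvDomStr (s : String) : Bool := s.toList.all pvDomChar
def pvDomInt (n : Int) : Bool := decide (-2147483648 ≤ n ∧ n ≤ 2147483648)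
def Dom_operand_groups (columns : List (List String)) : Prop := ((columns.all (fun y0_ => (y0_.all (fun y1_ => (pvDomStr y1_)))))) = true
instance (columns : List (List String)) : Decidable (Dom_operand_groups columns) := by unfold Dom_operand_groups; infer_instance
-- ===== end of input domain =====

-- B changes the decomposition: it precomputes all stripped strings, then splits on separator
-- positions and converts whole slices; equivalence of the collected generator outputs is proved.

-- the stripped joined column, shared shape of both Pythons' `"".join(column).strip()`
def ogVal (column : List String) : String := PySem.Str.strip (PySem.Str.join "" column)

-- int(val); Pre_ guarantees the parse succeeds (Python raises ValueError otherwise)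
def ogInt (val : String) : Int := (PySem.Int.ofStr? val).getD 0

-- ===== PORT A =====
def opA_go : List Int → List (List String) → List (List Int)
  | group, [] => [group]
  | group, column :: rest =>
    let val := ogVal column
    if val ≠ "" then opA_go (group ++ [ogInt val]) rest
    else group :: opA_go [] rest

def operand_groups (columns : List (List String)) : List (List Int) :=
  opA_go [] columns

-- ===== PORT B =====
-- [int(x) for x in seg]
def opB_emit (seg : List String) : List Int := seg.map ogInt

def opB_go (vals : List String) : Int → List (Int × String) → List (List Int)
  | start, [] => [opB_emit (PySem.List.slice vals (some start) none)]
  | start, (i, v) :: rest =>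
    if v = "" then opB_emit (PySem.List.slice vals (some start) (some i)) :: opB_go vals (i + 1) rest
    else opB_go vals start rest

def operand_groups_alt (columns : List (List String)) : List (List Int) :=
  let vals := columns.map ogVal
  opB_go vals 0 (PySem.List.enumerate vals 0)

-- ===== PRECONDITION & SPEC =====
-- Pre_ excludes exactly the inputs where Python's int() raises ValueError (a nonempty
-- stripped column that is not an integer literal); both A and B raise there.
def Pre_operand_groups (columns : List (List String)) : Prop :=
  (columns.all (fun c => ogVal c = "" || (PySem.Int.ofStr? (ogVal c)).isSome)) = true
instance (columns : List (List String)) : Decidable (Pre_operand_groups columns) := by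
  unfold Pre_operand_groups; infer_instance

def pvWitness_operand_groups : List (List String) := [["1", "2"], [], [" 34 "]]

def Spec_operand_groups (columns : List (List String)) (out : List (List Int)) : Prop := out = operand_groups_alt columns
instance (columns : List (List String)) (out : List (List Int)) : Decidable (Spec_operand_groups columns out) := by unfold Spec_operand_groups; infer_instance

-- ===== CLAIM (what is proved, stated in full; the proofs are below) =====
def Claim_equal_operand_groups : Prop := ∀ (columns : List (List String)), Dom_operand_groups columns → Pre_operand_groups columns → Spec_operand_groups columns (operand_groups columns)

-- ===== LEMMAS AND PROOFS =====

lemma opA_go_cons (g : List Int) (c : List String) (rest : List (List String)) :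
    opA_go g (c :: rest) =
      if ogVal c ≠ "" then opA_go (g ++ [ogInt (ogVal c)]) rest else g :: opA_go [] rest := rfl

lemma og_slice_succ (vals : List String) (start i : Nat) (v : String) (rest : List String)
    (hle : start ≤ i) (hdrop : vals.drop i = v :: rest) :
    PySem.List.slice vals (some (start : Int)) (some ((i : Int) + 1)) =
      PySem.List.slice vals (some (start : Int)) (some (i : Int)) ++ [v] := by
  have h1 : ((i : Int) + 1) = ((i + 1 : Nat) : Int) := by push_cast; ring
  rw [h1, PySem.List.slice_natCast, PySem.List.slice_natCast]
  have h2 : i + 1 - start = (i - start) + 1 := by omega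
  rw [h2, List.take_add_one]
  congr 1
  have hv : vals[i]? = some v := by
    have h0 : (vals.drop i)[0]? = some v := by rw [hdrop]; rfl
    rw [List.getElem?_drop] at h0
    simpa using h0
  have h3 : (vals.drop start)[i - start]? = vals[i]? := by
    rw [List.getElem?_drop]; congr 1; omega
  simp [h3, hv]

lemma og_main (vals : List String) : ∀ (cols : List (List String)) (i start : Nat),
    start ≤ i → vals.drop i = cols.map ogVal →
    opB_go vals (start : Int) (PySem.List.enumerate (cols.map ogVal) (i : Int)) =
      opA_go (opB_emit (PySem.List.slice vals (some (start : Int)) (some (i : Int)))) cols := by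
  intro cols
  induction cols with
  | nil =>
    intro i start hle hdrop
    simp only [List.map_nil, PySem.List.enumerate_nil, opB_go, opA_go]
    rw [PySem.List.slice_from_natCast, PySem.List.slice_natCast]
    congr 2
    have : vals.length ≤ i := by
      have := congrArg List.length hdrop
      simp [List.length_drop] at this
      omega
    rw [List.take_of_length_le]
    simp [List.length_drop]; omega
  | cons c rest ih =>
    intro i start hle hdrop
    simp only [List.map_cons, PySem.List.enumerate_cons, opB_go]
    by_cases hv : ogVal c = ""
    · rw [if_pos hv]
      have h1 : ((i : Int) + 1) = ((i + 1 : Nat) : Int) := by push_cast; ring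
      have hdrop' : vals.drop (i + 1) = rest.map ogVal := by
        have := congrArg List.tail hdrop
        simpa using this
      rw [h1, ih (i + 1) (i + 1) (le_refl _) hdrop']
      have hempty : PySem.List.slice vals (some ((i + 1 : Nat) : Int)) (some ((i + 1 : Nat) : Int)) = [] := by
        rw [PySem.List.slice_natCast]; simp
      rw [hempty]
      simp only [opA_go, hv, opB_emit, List.map_nil]
      simp
    · rw [if_neg hv]
      have h1 : ((i : Int) + 1) = ((i + 1 : Nat) : Int) := by push_cast; ring
      have hdrop' : vals.drop (i + 1) = rest.map ogVal := by
        have := congrArg List.tail hdrop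
        simpa using this
      rw [h1, ih (i + 1) start (by omega) hdrop']
      rw [← h1, og_slice_succ vals start i (ogVal c) (rest.map ogVal) hle hdrop]
      have he : opB_emit (PySem.List.slice vals (some (start : Int)) (some (i : Int)) ++ [ogVal c]) =
          opB_emit (PySem.List.slice vals (some (start : Int)) (some (i : Int))) ++ [ogInt (ogVal c)] := by
        simp [opB_emit]
      rw [he, opA_go_cons, if_pos hv]

-- ===== VERDICT (by name: the statement is the Claim_ definition above) =====
theorem operand_groups_spec : Claim_equal_operand_groups := by
  intro columns _ _
  unfold Spec_operand_groups operand_groups operand_groups_alt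
  have h := og_main (columns.map ogVal) columns 0 0 (le_refl _) (by simp)
  rw [show ((0 : Nat) : Int) = 0 by simp] at h
  rw [h]
  rw [show (some (0:Int)) = some ((0:Nat):Int) by simp, PySem.List.slice_natCast]
  simp [opB_emit]
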